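-- pv_equiv track=rewrite | github.com/aculich/pasifika-database | create-film-islands.py | normalize_island_name
-- ===== SOURCE A (Python) =====
-- def normalize_island_name(name):
--     """Normalize island names for matching."""
--     name = name.lower().strip()
--
--     # Handle common variations
--     variations = {
--         'big island': ['hawaii', 'hawaii island'],
--         'oahu': ['o\'ahu', 'oahu'],
--         'rapa nui': ['easter island'],
--         'papua new guinea': ['new guinea'],
--         'aotearoa': ['new zealand', 'north island', 'south island'],
--         'te ika-a-māui': ['north island', 'te ika-a-maui'],
--         'manono island': ['manono'],
--         'upolu island': ['upolu'],
--         'tanna island': ['tanna'],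
--         'bougainville island': ['bougainville'],
--         'goulburn islands': ['goulburn'],
--         'satawal': ['satawal island']
--     }
--
--     for standard, variants in variations.items():
--         if name in variants or name == standard:
--             return standard
--
--     return name
-- ===== SOURCE B (Python) =====
-- _VARIATIONS = {
--     'big island': ['hawaii', 'hawaii island'],
--     'oahu': ['o\'ahu', 'oahu'],
--     'rapa nui': ['easter island'],
--     'papua new guinea': ['new guinea'],
--     'aotearoa': ['new zealand', 'north island', 'south island'],
--     'te ika-a-māui': ['north island', 'te ika-a-maui'],
--     'manono island': ['manono'],
--     'upolu island': ['upolu'],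
--     'tanna island': ['tanna'],
--     'bougainville island': ['bougainville'],
--     'goulburn islands': ['goulburn'],
--     'satawal': ['satawal island']
-- }
--
-- # Reverse map built once: every variant and every standard key maps to its standard.
-- # First insertion wins, so 'north island' resolves to 'aotearoa' as in the original scan order.
-- _REVERSE = {}
-- for _standard, _variants in _VARIATIONS.items():
--     for _key in _variants + [_standard]:
--         _REVERSE.setdefault(_key, _standard)
--
--
-- def normalize_island_name(name):
--     """Normalize island names for matching."""
--     name = name.lower().strip()
--     return _REVERSE.get(name, name)
-- ===== Notes on version B (the rewrite author's own statement) =====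
-- stated objective: idiomatic
-- what changed: Replaces the per-call linear scan over the variations table (membership test in each variant list) by a reverse dictionary precomputed once with first-insertion-wins, so each call is a single dict lookup.
import Mathlib
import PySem

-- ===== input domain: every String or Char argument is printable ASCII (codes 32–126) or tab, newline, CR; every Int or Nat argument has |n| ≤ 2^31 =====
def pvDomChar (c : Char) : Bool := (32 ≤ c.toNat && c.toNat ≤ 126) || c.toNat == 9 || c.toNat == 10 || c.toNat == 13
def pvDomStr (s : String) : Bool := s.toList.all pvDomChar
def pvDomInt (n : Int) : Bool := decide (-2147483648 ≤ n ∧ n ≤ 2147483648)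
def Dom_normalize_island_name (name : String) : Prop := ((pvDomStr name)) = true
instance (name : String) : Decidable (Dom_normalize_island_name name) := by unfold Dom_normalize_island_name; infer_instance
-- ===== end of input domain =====

-- B replaces A's per-call scan of the variations table by a reverse dictionary
-- built once (first insertion wins), so the call is a single lookup; objective: idiomatic.

-- the variations table (shared data, not algorithm)
def pvVariations : List (String × List String) :=
  [ ("big island", ["hawaii", "hawaii island"]),
    ("oahu", ["o'ahu", "oahu"]),
    ("rapa nui", ["easter island"]),
    ("papua new guinea", ["new guinea"]),
    ("aotearoa", ["new zealand", "north island", "south island"]),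
    ("te ika-a-māui", ["north island", "te ika-a-maui"]),
    ("manono island", ["manono"]),
    ("upolu island", ["upolu"]),
    ("tanna island", ["tanna"]),
    ("bougainville island", ["bougainville"]),
    ("goulburn islands", ["goulburn"]),
    ("satawal", ["satawal island"]) ]

-- ===== PORT A =====
-- the 'for standard, variants in variations.items(): if name in variants or name == standard: return standard'
def pvScanA (n : String) : List (String × List String) → String
  | [] => n
  | (standard, variants) :: rest =>
      if variants.contains n || n == standard then standard else pvScanA n rest

def normalize_island_name (name : String) : String :=
  let n := PySem.Str.strip (PySem.Str.lower name)
  pvScanA n pvVariations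

-- ===== PORT B =====
-- reverse dict built once over the same items, insert only if the key is absent (first wins)
def pvReverse : PySem.Dict String String :=
  pvVariations.foldl
    (fun rev p =>
      (p.2 ++ [p.1]).foldl
        (fun rev key => if rev.contains key then rev else rev.insert key p.1) rev)
    PySem.Dict.empty

def normalize_island_name_alt (name : String) : String :=
  let n := PySem.Str.strip (PySem.Str.lower name)
  pvReverse.getD n n

-- ===== PRECONDITION & SPEC =====
def Spec_normalize_island_name (name : String) (out : String) : Prop := out = normalize_island_name_alt name
instance (name : String) (out : String) : Decidable (Spec_normalize_island_name name out) := by unfold Spec_normalize_island_name; infer_instance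

-- ===== CLAIM (what is proved, stated in full; the proofs are below) =====
def Claim_equal_normalize_island_name : Prop := ∀ (name : String), Dom_normalize_island_name name → Spec_normalize_island_name name (normalize_island_name name)

-- ===== LEMMAS AND PROOFS =====
-- proof-side literal value of pvReverse and the key set
def pvRevLit : List (String × String) :=
  [ ("hawaii", "big island"),
    ("hawaii island", "big island"),
    ("big island", "big island"),
    ("o'ahu", "oahu"),
    ("oahu", "oahu"),
    ("easter island", "rapa nui"),
    ("rapa nui", "rapa nui"),
    ("new guinea", "papua new guinea"),
    ("papua new guinea", "papua new guinea"),
    ("new zealand", "aotearoa"),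
    ("north island", "aotearoa"),
    ("south island", "aotearoa"),
    ("aotearoa", "aotearoa"),
    ("te ika-a-maui", "te ika-a-māui"),
    ("te ika-a-māui", "te ika-a-māui"),
    ("manono", "manono island"),
    ("manono island", "manono island"),
    ("upolu", "upolu island"),
    ("upolu island", "upolu island"),
    ("tanna", "tanna island"),
    ("tanna island", "tanna island"),
    ("bougainville", "bougainville island"),
    ("bougainville island", "bougainville island"),
    ("goulburn", "goulburn islands"),
    ("goulburn islands", "goulburn islands"),
    ("satawal island", "satawal"),
    ("satawal", "satawal") ]

theorem pvReverse_eq : pvReverse = PySem.Dict.mk pvRevLit := by decide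

set_option maxHeartbeats 1000000 in
theorem pvScan_eq_lookup (n : String) : pvScanA n pvVariations = pvReverse.getD n n := by
  rw [pvReverse_eq]
  by_cases h : n ∈ pvRevLit.map Prod.fst
  · simp only [pvRevLit, List.map_cons, List.map_nil, List.mem_cons, List.not_mem_nil,
      or_false] at h
    rcases h with rfl|rfl|rfl|rfl|rfl|rfl|rfl|rfl|rfl|rfl|rfl|rfl|rfl|rfl|rfl|rfl|rfl|rfl|rfl|rfl|rfl|rfl|rfl|rfl|rfl|rfl|rfl <;> decide
  · simp only [pvRevLit, List.map_cons, List.map_nil, List.mem_cons, List.not_mem_nil,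
      or_false, not_or] at h
    obtain ⟨h1, h2, h3, h4, h5, h6, h7, h8, h9, h10, h11, h12, h13, h14, h15, h16, h17, h18, h19, h20, h21, h22, h23, h24, h25, h26, h27⟩ := h
    simp only [pvScanA, pvVariations, PySem.Dict.getD, PySem.Dict.get?, pvRevLit,
      List.contains_cons, List.contains_nil,
      beq_eq_false_iff_ne.mpr h1, beq_eq_false_iff_ne.mpr h2, beq_eq_false_iff_ne.mpr h3, beq_eq_false_iff_ne.mpr h4, beq_eq_false_iff_ne.mpr h5, beq_eq_false_iff_ne.mpr h6, beq_eq_false_iff_ne.mpr h7, beq_eq_false_iff_ne.mpr h8, beq_eq_false_iff_ne.mpr h9, beq_eq_false_iff_ne.mpr h10, beq_eq_false_iff_ne.mpr h11, beq_eq_false_iff_ne.mpr h12, beq_eq_false_iff_ne.mpr h13, beq_eq_false_iff_ne.mpr h14, beq_eq_false_iff_ne.mpr h15, beq_eq_false_iff_ne.mpr h16, beq_eq_false_iff_ne.mpr h17, beq_eq_false_iff_ne.mpr h18, beq_eq_false_iff_ne.mpr h19, beq_eq_false_iff_ne.mpr h20, beq_eq_false_iff_ne.mpr h21, beq_eq_false_iff_ne.mpr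 h22, beq_eq_false_iff_ne.mpr h23, beq_eq_false_iff_ne.mpr h24, beq_eq_false_iff_ne.mpr h25, beq_eq_false_iff_ne.mpr h26, beq_eq_false_iff_ne.mpr h27,
      Bool.or_false, Bool.false_eq_true, if_false]
    simp [List.find?, beq_eq_false_iff_ne.mpr (Ne.symm h1), beq_eq_false_iff_ne.mpr (Ne.symm h2), beq_eq_false_iff_ne.mpr (Ne.symm h3), beq_eq_false_iff_ne.mpr (Ne.symm h4), beq_eq_false_iff_ne.mpr (Ne.symm h5), beq_eq_false_iff_ne.mpr (Ne.symm h6), beq_eq_false_iff_ne.mpr (Ne.symm h7), beq_eq_false_iff_ne.mpr (Ne.symm h8), beq_eq_false_iff_ne.mpr (Ne.symm h9), beq_eq_false_iff_ne.mpr (Ne.symm h10), beq_eq_false_iff_ne.mpr (Ne.symm h11), beq_eq_false_iff_ne.mpr (Ne.symm h12), beq_eq_false_iff_ne.mpr (Ne.symm h13), beq_eq_false_iff_ne.mpr (Ne.symm h14), beq_eq_false_iff_ne.mpr (Ne.symm h15), beq_eq_false_iff_ne.mpr (Ne.symm h16), beq_eq_false_iff_ne.mpr (Ne.symm h17), beq_eq_false_iff_ne.mpr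 (Ne.symm h18), beq_eq_false_iff_ne.mpr (Ne.symm h19), beq_eq_false_iff_ne.mpr (Ne.symm h20), beq_eq_false_iff_ne.mpr (Ne.symm h21), beq_eq_false_iff_ne.mpr (Ne.symm h22), beq_eq_false_iff_ne.mpr (Ne.symm h23), beq_eq_false_iff_ne.mpr (Ne.symm h24), beq_eq_false_iff_ne.mpr (Ne.symm h25), beq_eq_false_iff_ne.mpr (Ne.symm h26), beq_eq_false_iff_ne.mpr (Ne.symm h27)]

-- ===== VERDICT (by name: the statement is the Claim_ definition above) =====
theorem normalize_island_name_spec : Claim_equal_normalize_island_name := by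
  intro name _
  unfold Spec_normalize_island_name normalize_island_name normalize_island_name_alt
  exact pvScan_eq_lookup _
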